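-- pv_equiv track=rewrite | github.com/fulcircle/algorithm_practice | General/string_ordered_subsets.py | ordered_subsets_bottom_up
-- ===== SOURCE A (Python) =====
-- def ordered_subsets_bottom_up(available_characters, curr_string="", ordered_subsets=None):
--
--     if not ordered_subsets:
--         ordered_subsets = []
--
--     if not isinstance(available_characters, list):
--         available_characters = list(available_characters)
--
--     for i in range(0, len(available_characters)):
--         char = available_characters[i]
--         new_string = curr_string + char
--         ordered_subsets.append(new_string)
--         del available_characters[i]
--         ordered_subsets_bottom_up(available_characters, new_string, ordered_subsets)
--         available_characters.insert(i, char) # backtrack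
--
--     return ordered_subsets
-- ===== SOURCE B (Python) =====
-- def ordered_subsets_bottom_up(available_characters, curr_string="", ordered_subsets=None):
--     # Iterative DFS with an explicit stack, producing A's exact preorder output.
--     if not ordered_subsets:
--         ordered_subsets = []
--     chars = list(available_characters)
--     stack = [(curr_string + chars[j], chars[:j] + chars[j + 1:])
--              for j in range(len(chars))]
--     stack.reverse()
--     while stack:
--         s, rem = stack.pop()
--         ordered_subsets.append(s)
--         children = [(s + rem[j], rem[:j] + rem[j + 1:])
--                     for j in range(len(rem))]
--         stack.extend(reversed(children))
--     return ordered_subsets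
-- ===== Notes on version B (the rewrite author's own statement) =====
-- stated objective: alternative
-- what changed: Replaces A's mutual recursion with backtracking (del/insert on a shared list) by an iterative DFS over an explicit stack of (string, remaining-chars) states pushed in reverse, preserving the exact preorder output.
import Mathlib
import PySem

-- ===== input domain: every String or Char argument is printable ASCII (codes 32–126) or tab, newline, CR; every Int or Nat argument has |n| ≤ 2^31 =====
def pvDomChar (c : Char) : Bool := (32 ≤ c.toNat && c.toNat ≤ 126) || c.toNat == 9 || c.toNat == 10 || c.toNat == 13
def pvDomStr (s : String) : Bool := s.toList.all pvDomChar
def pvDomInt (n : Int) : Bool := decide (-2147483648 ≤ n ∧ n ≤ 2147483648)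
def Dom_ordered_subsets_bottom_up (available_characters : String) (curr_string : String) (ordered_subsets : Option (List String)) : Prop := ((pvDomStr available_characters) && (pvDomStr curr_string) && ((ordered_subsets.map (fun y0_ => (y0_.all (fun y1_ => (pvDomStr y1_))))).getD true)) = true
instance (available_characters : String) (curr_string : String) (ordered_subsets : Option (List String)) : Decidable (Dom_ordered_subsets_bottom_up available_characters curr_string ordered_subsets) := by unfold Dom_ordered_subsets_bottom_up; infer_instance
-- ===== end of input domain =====

-- B replaces A's recursion-with-backtracking by an iterative explicit-stack DFS (same output,
-- same cost); the equivalence proved is about the return value (both Pythons also append to a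
-- supplied non-empty ordered_subsets list in the same way).

-- ===== PORT A =====
-- A's `for i in range(len(avail)): char = avail[i]; new = curr+char; append; del avail[i];
-- recurse(avail, new, subsets); avail.insert(i, char)`.  The del/insert pair means the recursive
-- call sees exactly `avail` with index i removed, so the loop body is transcribed with
-- `avail.eraseIdx i` passed to the recursive call (the shared-list mutation nets to this).
-- `avail[i]` is in range (i < length), so `getD` is exact.
mutual
def pvALoop (avail : List Char) (curr : String) (i : Nat) (acc : List String) : List String :=
  if _h : i < avail.length then
    let c := avail.getD i ' '
    let ns := curr.push c
    pvALoop avail curr (i + 1) (pvAGo (avail.eraseIdx i) ns (acc ++ [ns]))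
  else acc
termination_by (avail.length, avail.length + 1 - i)
decreasing_by
  all_goals simp_wf
  all_goals first
    | (apply Prod.Lex.left; simp only [List.length_eraseIdx]; split <;> omega)
    | (apply Prod.Lex.right; omega)

def pvAGo (avail : List Char) (curr : String) (acc : List String) : List String :=
  pvALoop avail curr 0 acc
termination_by (avail.length, avail.length + 2)
decreasing_by
  all_goals simp_wf
  all_goals first
    | (apply Prod.Lex.left; simp only [List.length_eraseIdx]; split <;> omega)
    | (apply Prod.Lex.right; omega)
end

-- `if not ordered_subsets: ordered_subsets = []`: None and the empty list both become [] (getD []).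
def ordered_subsets_bottom_up (available_characters : String) (curr_string : String) (ordered_subsets : Option (List String)) : List String :=
  pvAGo available_characters.toList curr_string (ordered_subsets.getD [])

-- ===== PORT B =====
-- children of a state: [(s + rem[j], rem[:j] + rem[j+1:]) for j in range(len(rem))]
def pvChildren (s : String) (rem : List Char) : List (String × List Char) :=
  (List.range rem.length).map (fun j => (s.push (rem.getD j ' '), rem.eraseIdx j))

-- weight used only as the termination measure of the stack loop
def pvTf : Nat → Nat
  | 0 => 1
  | n + 1 => (n + 1) * pvTf n + 1

def pvW (st : List (String × List Char)) : Nat := (st.map (fun p => pvTf p.2.length)).sum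

theorem pvW_children (s : String) (rem : List Char) :
    pvW (pvChildren s rem) = rem.length * pvTf (rem.length - 1) := by
  unfold pvW pvChildren
  rw [List.map_map]
  have h : ∀ j ∈ List.range rem.length,
      ((fun p : String × List Char => pvTf p.2.length) ∘
        (fun j => (s.push (rem.getD j ' '), rem.eraseIdx j))) j = pvTf (rem.length - 1) := by
    intro j hj
    simp only [List.mem_range] at hj
    simp [Function.comp, List.length_eraseIdx, hj]
  rw [List.map_congr_left h, List.map_const', List.sum_replicate]
  simp

-- the Python `while stack:` loop; list head = top of stack, `stack.extend(reversed(children));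
-- pop` = the children prepended in order.
def pvStackLoop (stack : List (String × List Char)) (acc : List String) : List String :=
  match stack with
  | [] => acc
  | (s, rem) :: rest => pvStackLoop (pvChildren s rem ++ rest) (acc ++ [s])
termination_by pvW stack
decreasing_by
  unfold pvW
  simp only [List.map_append, List.sum_append, List.map_cons, List.sum_cons]
  have h1 : (List.map (fun p : String × List Char => pvTf p.2.length) (pvChildren s rem)).sum
      = rem.length * pvTf (rem.length - 1) := pvW_children s rem
  rw [h1]
  cases hn : rem.length with
  | zero => simp [pvTf]
  | succ m => simp [pvTf]

def ordered_subsets_bottom_up_alt (available_characters : String) (curr_string : String) (ordered_subsets : Option (List String)) : List String :=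
  pvStackLoop (pvChildren curr_string available_characters.toList) (ordered_subsets.getD [])

-- ===== PRECONDITION & SPEC =====
def Spec_ordered_subsets_bottom_up (available_characters : String) (curr_string : String) (ordered_subsets : Option (List String)) (out : List String) : Prop := out = ordered_subsets_bottom_up_alt available_characters curr_string ordered_subsets
instance (available_characters : String) (curr_string : String) (ordered_subsets : Option (List String)) (out : List String) : Decidable (Spec_ordered_subsets_bottom_up available_characters curr_string ordered_subsets out) := by unfold Spec_ordered_subsets_bottom_up; infer_instance

-- ===== CLAIM (what is proved, stated in full; the proofs are below) =====
def Claim_equal_ordered_subsets_bottom_up : Prop := ∀ (available_characters : String) (curr_string : String) (ordered_subsets : Option (List String)), Dom_ordered_subsets_bottom_up available_characters curr_string ordered_subsets → Spec_ordered_subsets_bottom_up available_characters curr_string ordered_subsets (ordered_subsets_bottom_up available_characters curr_string ordered_subsets)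

-- ===== LEMMAS AND PROOFS =====

-- common specification: pvSpecN s rem = the preorder listing rooted at the emitted string s,
-- pvSpecC s rem i = the listings of the children with index ≥ i, concatenated
mutual
def pvSpecC (s : String) (rem : List Char) (i : Nat) : List String :=
  if _h : i < rem.length then
    pvSpecN (s.push (rem.getD i ' ')) (rem.eraseIdx i) ++ pvSpecC s rem (i + 1)
  else []
termination_by (rem.length, rem.length + 1 - i)
decreasing_by
  all_goals simp_wf
  all_goals first
    | (apply Prod.Lex.left; simp only [List.length_eraseIdx]; split <;> omega)
    | (apply Prod.Lex.right; omega)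

def pvSpecN (s : String) (rem : List Char) : List String :=
  s :: pvSpecC s rem 0
termination_by (rem.length, rem.length + 2)
decreasing_by
  all_goals simp_wf; apply Prod.Lex.right; omega
end

theorem pvALoop_eq (n : Nat) : ∀ (avail : List Char), avail.length ≤ n →
    ∀ (curr : String) (d i : Nat), avail.length - i ≤ d →
    ∀ (acc : List String), pvALoop avail curr i acc = acc ++ pvSpecC curr avail i := by
  induction n with
  | zero =>
    intro avail hlen curr d i _ acc
    have h : ¬ i < avail.length := by omega
    rw [pvALoop, pvSpecC]
    simp [h]
  | succ n ihn =>
    intro avail hlen curr d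
    induction d with
    | zero =>
      intro i hd acc
      have h : ¬ i < avail.length := by omega
      rw [pvALoop, pvSpecC]
      simp [h]
    | succ d ihd =>
      intro i hd acc
      by_cases h : i < avail.length
      · rw [pvALoop, pvSpecC]
        rw [dif_pos h, dif_pos h]
        have hgo : pvAGo (avail.eraseIdx i) (curr.push (avail.getD i ' '))
            (acc ++ [curr.push (avail.getD i ' ')])
            = (acc ++ [curr.push (avail.getD i ' ')]) ++
              pvSpecC (curr.push (avail.getD i ' ')) (avail.eraseIdx i) 0 := by
          rw [pvAGo]
          exact ihn (avail.eraseIdx i) (by simp [List.length_eraseIdx, h]; omega)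
            (curr.push (avail.getD i ' ')) (avail.eraseIdx i).length 0 (by omega)
            (acc ++ [curr.push (avail.getD i ' ')])
        simp only [hgo, ihd (i + 1) (by omega), pvSpecN]
        simp
      · rw [pvALoop, pvSpecC]
        simp [h]

theorem pvSpecC_flatMap (s : String) (rem : List Char) (d : Nat) : ∀ (i : Nat), rem.length - i ≤ d →
    (List.range' i (rem.length - i)).flatMap
      (fun j => pvSpecN (s.push (rem.getD j ' ')) (rem.eraseIdx j)) = pvSpecC s rem i := by
  induction d with
  | zero =>
    intro i h
    have h0 : rem.length - i = 0 := by omega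
    have h2 : ¬ i < rem.length := by omega
    rw [h0, pvSpecC]
    simp [h2]
  | succ d ihd =>
    intro i h
    by_cases hi : i < rem.length
    · have h1 : rem.length - i = (rem.length - (i + 1)) + 1 := by omega
      rw [h1, List.range'_succ, List.flatMap_cons, pvSpecC, dif_pos hi,
          ihd (i + 1) (by omega)]
    · have h0 : rem.length - i = 0 := by omega
      rw [h0, pvSpecC]
      simp [hi]

theorem pvChildren_flatMap (s : String) (rem : List Char) :
    (pvChildren s rem).flatMap (fun p => pvSpecN p.1 p.2) = pvSpecC s rem 0 := by
  unfold pvChildren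
  rw [List.flatMap_map]
  have := pvSpecC_flatMap s rem rem.length 0 (by omega)
  simpa [List.range_eq_range', Function.comp] using this

theorem pvStackLoop_eq : ∀ (stack : List (String × List Char)) (acc : List String),
    pvStackLoop stack acc = acc ++ stack.flatMap (fun p => pvSpecN p.1 p.2) := by
  intro stack acc
  induction stack, acc using pvStackLoop.induct with
  | case1 acc => simp [pvStackLoop]
  | case2 acc s rem rest ih =>
    rw [pvStackLoop, ih]
    simp only [List.flatMap_append, List.flatMap_cons]
    rw [pvChildren_flatMap]
    conv_rhs => rw [pvSpecN]
    simp

-- ===== VERDICT (by name: the statement is the Claim_ definition above) =====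
theorem ordered_subsets_bottom_up_spec : Claim_equal_ordered_subsets_bottom_up := by
  intro ac cs os _
  unfold Spec_ordered_subsets_bottom_up ordered_subsets_bottom_up ordered_subsets_bottom_up_alt
  rw [pvAGo, pvALoop_eq ac.toList.length ac.toList le_rfl cs ac.toList.length 0 (by omega),
      pvStackLoop_eq, pvChildren_flatMap]
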